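-- pv_equiv track=rewrite | github.com/Qudef1/ppois_sem2 | aois/lab1/transmitter.py | divide_unsigned_with_precision
-- ===== SOURCE A (Python) =====
-- def divide_unsigned_with_precision(dividend: int, divisor: int, precision=5):
--     """
--     Деление двух чисел с заданной точностью (до precision разрядов после запятой).
--     Возвращает (целая_часть, дробная_часть_строка).
--     """
--     if divisor == 0:
--         raise ZeroDivisionError("Деление на ноль")
--
--     # Целая часть
--     integer_part = dividend // divisor
--     remainder = dividend % divisor
--
--     # Дробная часть
--     fractional_bits = []
--     for _ in range(precision):
--         remainder *= 2
--         bit = remainder // divisor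
--         fractional_bits.append(str(bit))
--         remainder %= divisor
--
--     return integer_part, ''.join(fractional_bits), remainder
-- ===== SOURCE B (Python) =====
-- def divide_unsigned_with_precision(dividend: int, divisor: int, precision=5):
--     """One-shot version: compute all fractional bits with a single scaled division."""
--     if divisor == 0:
--         raise ZeroDivisionError("Деление на ноль")
--     integer_part, r0 = divmod(dividend, divisor)
--     if precision <= 0:
--         return integer_part, '', r0
--     q, rem = divmod(r0 << precision, divisor)
--     return integer_part, format(q, f'0{precision}b'), rem
-- ===== Notes on version B (the rewrite author's own statement) =====
-- stated objective: faster
-- what changed: Replaces the bit-by-bit fractional loop (precision Python-level iterations of *2, //, %) with a single scaled division q, rem = divmod(r0 << precision, divisor) rendered as a fixed-width binary string via format.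
import Mathlib
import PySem

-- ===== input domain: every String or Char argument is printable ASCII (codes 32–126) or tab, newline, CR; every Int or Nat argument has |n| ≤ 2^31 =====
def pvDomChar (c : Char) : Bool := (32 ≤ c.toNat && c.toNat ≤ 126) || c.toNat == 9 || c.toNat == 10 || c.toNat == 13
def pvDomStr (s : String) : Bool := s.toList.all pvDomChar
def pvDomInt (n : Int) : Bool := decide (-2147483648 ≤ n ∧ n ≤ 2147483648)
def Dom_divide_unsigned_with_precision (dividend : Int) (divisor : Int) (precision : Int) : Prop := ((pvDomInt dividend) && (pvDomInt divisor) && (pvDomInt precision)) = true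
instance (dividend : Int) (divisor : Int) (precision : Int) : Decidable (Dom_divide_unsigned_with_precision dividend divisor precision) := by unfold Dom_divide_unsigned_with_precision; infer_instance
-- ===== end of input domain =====

-- B replaces A's bit-by-bit fractional loop with a single scaled division (q = (r0 << p) // divisor)
-- rendered as a fixed-width binary string; equivalence of the return values is proved for divisor ≠ 0.

-- ===== PORT A =====
-- the 'for _ in range(precision)' loop; state = (remainder, accumulated list of bit strings)
def pvLoopA (d : Int) : Nat → Int → List String → List String × Int
  | 0, r, acc => (acc, r)
  | n+1, r, acc =>
    let r2 := r * 2
    pvLoopA d n (PySem.Int.mod r2 d) (acc ++ [PySem.Int.toStr (PySem.Int.floordiv r2 d)])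

def divide_unsigned_with_precision (dividend : Int) (divisor : Int) (precision : Int) : Int × String × Int :=
  let integer_part := PySem.Int.floordiv dividend divisor
  let remainder := PySem.Int.mod dividend divisor
  let res := pvLoopA divisor precision.toNat remainder []   -- range(precision) is empty for precision ≤ 0
  (integer_part, PySem.Str.join "" res.1, res.2)

-- ===== PORT B =====
-- port of format(q, f'0{w}b'): fixed-width binary, zero-padded; exact for 0 ≤ q < 2^w,
-- which holds for every q this program feeds it (q = (r0 << w) // divisor ∈ [0, 2^w)).
def pvFmtBin : Nat → Int → List Char
  | 0, _ => []
  | w+1, q => pvFmtBin w (PySem.Int.floordiv q 2) ++ [if PySem.Int.mod q 2 == 1 then '1' else '0']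

def divide_unsigned_with_precision_alt (dividend : Int) (divisor : Int) (precision : Int) : Int × String × Int :=
  let integer_part := PySem.Int.floordiv dividend divisor
  let r0 := PySem.Int.mod dividend divisor
  if precision ≤ 0 then (integer_part, "", r0)
  else
    let scaled := r0 * 2 ^ precision.toNat   -- r0 << precision
    (integer_part,
     String.ofList (pvFmtBin precision.toNat (PySem.Int.floordiv scaled divisor)),
     PySem.Int.mod scaled divisor)

-- ===== PRECONDITION & SPEC =====
-- A raises ZeroDivisionError iff divisor == 0; that is the only excluded input.
def Pre_divide_unsigned_with_precision (dividend : Int) (divisor : Int) (precision : Int) : Prop := divisor ≠ 0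
instance (dividend : Int) (divisor : Int) (precision : Int) : Decidable (Pre_divide_unsigned_with_precision dividend divisor precision) := by unfold Pre_divide_unsigned_with_precision; infer_instance

def pvWitness_divide_unsigned_with_precision : Int × Int × Int := (7, 3, 5)

def Spec_divide_unsigned_with_precision (dividend : Int) (divisor : Int) (precision : Int) (out : Int × String × Int) : Prop := out = divide_unsigned_with_precision_alt dividend divisor precision
instance (dividend : Int) (divisor : Int) (precision : Int) (out : Int × String × Int) : Decidable (Spec_divide_unsigned_with_precision dividend divisor precision out) := by unfold Spec_divide_unsigned_with_precision; infer_instance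

-- ===== CLAIM (what is proved, stated in full; the proofs are below) =====
def Claim_equal_divide_unsigned_with_precision : Prop := ∀ (dividend : Int) (divisor : Int) (precision : Int), Dom_divide_unsigned_with_precision dividend divisor precision → Pre_divide_unsigned_with_precision dividend divisor precision → Spec_divide_unsigned_with_precision dividend divisor precision (divide_unsigned_with_precision dividend divisor precision)

-- ===== LEMMAS AND PROOFS =====

-- head-cons form of pvFmtBin: the leading character is the top bit
theorem pvFmtBin_cons (n : Nat) (b q' : Int) (hb : b = 0 ∨ b = 1)
    (h0 : 0 ≤ q') (h1 : q' < 2 ^ n) :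
    pvFmtBin (n+1) (b * 2 ^ n + q') = (if b == 1 then '1' else '0') :: pvFmtBin n q' := by
  induction n generalizing q' with
  | zero =>
    rcases hb with hb | hb <;> subst hb <;>
      · interval_cases q' <;> decide
  | succ n ih =>
    show pvFmtBin (n+1) (PySem.Int.floordiv (b * 2 ^ (n+1) + q') 2)
        ++ [if PySem.Int.mod (b * 2 ^ (n+1) + q') 2 == 1 then '1' else '0'] = _
    have e2 : (0:Int) < 2 := by norm_num
    have hdiv : PySem.Int.floordiv (b * 2 ^ (n+1) + q') 2 = b * 2 ^ n + PySem.Int.floordiv q' 2 := by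
      rw [PySem.Int.floordiv_eq_ediv_of_pos e2, PySem.Int.floordiv_eq_ediv_of_pos e2]
      rcases hb with hb | hb <;> subst hb <;> omega
    have hmod : PySem.Int.mod (b * 2 ^ (n+1) + q') 2 = PySem.Int.mod q' 2 := by
      rw [PySem.Int.mod_eq_emod_of_pos e2, PySem.Int.mod_eq_emod_of_pos e2]
      rcases hb with hb | hb <;> subst hb <;> omega
    have hq0 : 0 ≤ PySem.Int.floordiv q' 2 := by
      rw [PySem.Int.floordiv_eq_ediv_of_pos e2]; omega
    have hq1 : PySem.Int.floordiv q' 2 < 2 ^ n := by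
      rw [PySem.Int.floordiv_eq_ediv_of_pos e2]
      have : q' < 2 ^ (n+1) := h1
      rw [pow_succ] at this; omega
    rw [hdiv, hmod, ih _ hq0 hq1]
    show _ = (if b == 1 then '1' else '0') ::
        (pvFmtBin n (PySem.Int.floordiv q' 2) ++ [if PySem.Int.mod q' 2 == 1 then '1' else '0'])
    simp

-- one step of the fractional loop, divisor positive: split off the top bit of the scaled quotient
theorem pvStep_decomp (d : Int) (hd : 0 < d) (r : Int) (n : Nat) :
    PySem.Int.floordiv (r * 2 * 2 ^ n) d
      = PySem.Int.floordiv (r * 2) d * 2 ^ n + PySem.Int.floordiv (PySem.Int.mod (r * 2) d * 2 ^ n) d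
    ∧ PySem.Int.mod (r * 2 * 2 ^ n) d = PySem.Int.mod (PySem.Int.mod (r * 2) d * 2 ^ n) d := by
  have hdne : d ≠ 0 := ne_of_gt hd
  rw [PySem.Int.floordiv_eq_ediv_of_pos hd, PySem.Int.floordiv_eq_ediv_of_pos hd,
      PySem.Int.floordiv_eq_ediv_of_pos hd, PySem.Int.mod_eq_emod_of_pos hd,
      PySem.Int.mod_eq_emod_of_pos hd, PySem.Int.mod_eq_emod_of_pos hd]
  have key : r * 2 * 2 ^ n = r * 2 % d * 2 ^ n + d * (r * 2 / d * 2 ^ n) := by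
    have h := Int.mul_ediv_add_emod (r * 2) d
    linear_combination (-(2:Int) ^ n) * h
  constructor
  · rw [key, Int.add_mul_ediv_left _ _ hdne]; ring
  · rw [key, Int.add_mul_emod_self_left]

theorem pvQuot_bounds (d : Int) (hd : 0 < d) (t : Int) (h0 : 0 ≤ t) (h1 : t < d) (n : Nat) :
    0 ≤ PySem.Int.floordiv (t * 2 ^ n) d ∧ PySem.Int.floordiv (t * 2 ^ n) d < 2 ^ n := by
  rw [PySem.Int.floordiv_eq_ediv_of_pos hd]
  have hp : (0:Int) < 2 ^ n := by positivity
  constructor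
  · exact Int.ediv_nonneg (by positivity) (le_of_lt hd)
  · rw [Int.ediv_lt_iff_lt_mul hd]; nlinarith

-- the fractional loop computes exactly the fixed-width binary rendering of the one-shot quotient
theorem pvLoopA_spec (d : Int) (hd : 0 < d) (n : Nat) :
    ∀ (r : Int), 0 ≤ r → r < d → ∀ (acc : List String),
    pvLoopA d n r acc
      = (acc ++ (pvFmtBin n (PySem.Int.floordiv (r * 2 ^ n) d)).map (fun c => String.ofList [c]),
         PySem.Int.mod (r * 2 ^ n) d) := by
  induction n with
  | zero =>
    intro r h0 h1 acc
    simp [pvLoopA, pvFmtBin, PySem.Int.mod_eq_emod_of_pos hd, Int.emod_eq_of_lt h0 h1]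
  | succ n ih =>
    intro r h0 h1 acc
    have hs0 : 0 ≤ PySem.Int.mod (r * 2) d := PySem.Int.mod_nonneg _ hd
    have hs1 : PySem.Int.mod (r * 2) d < d := PySem.Int.mod_lt _ hd
    have hb : PySem.Int.floordiv (r * 2) d = 0 ∨ PySem.Int.floordiv (r * 2) d = 1 := by
      rw [PySem.Int.floordiv_eq_ediv_of_pos hd]
      have hlo : 0 ≤ r * 2 / d := Int.ediv_nonneg (by omega) (le_of_lt hd)
      have hhi : r * 2 / d < 2 := by rw [Int.ediv_lt_iff_lt_mul hd]; omega
      omega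
    obtain ⟨hdecq, hdecm⟩ := pvStep_decomp d hd r n
    obtain ⟨hq0, hq1⟩ := pvQuot_bounds d hd _ hs0 hs1 n
    show pvLoopA d n (PySem.Int.mod (r * 2) d)
        (acc ++ [PySem.Int.toStr (PySem.Int.floordiv (r * 2) d)]) = _
    rw [ih _ hs0 hs1]
    have hexp : r * 2 ^ (n + 1) = r * 2 * 2 ^ n := by ring
    rw [hexp, hdecq, hdecm, pvFmtBin_cons n _ _ hb hq0 hq1]
    rcases hb with hb | hb <;> rw [hb] <;> simp <;> decide

-- for a negative divisor the loop mirrors the positive-divisor loop on negated state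
theorem pvLoopA_neg (d : Int) (n : Nat) :
    ∀ (r : Int) (acc : List String),
    pvLoopA d n r acc = ((pvLoopA (-d) n (-r) acc).1, -(pvLoopA (-d) n (-r) acc).2) := by
  induction n with
  | zero => intro r acc; simp [pvLoopA]
  | succ n ih =>
    intro r acc
    have hm2 : -PySem.Int.mod (r * 2) d = PySem.Int.mod (-r * 2) (-d) := by
      have h := PySem.Int.mod_neg_neg (r * 2) d
      rw [show -r * 2 = -(r * 2) by ring]
      omega
    have hq : PySem.Int.floordiv (r * 2) d = PySem.Int.floordiv (-r * 2) (-d) := by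
      have h := PySem.Int.floordiv_neg_neg (r * 2) d
      rw [show -r * 2 = -(r * 2) by ring, h]
    have hstepL : pvLoopA d (n+1) r acc
        = pvLoopA d n (PySem.Int.mod (r * 2) d)
            (acc ++ [PySem.Int.toStr (PySem.Int.floordiv (r * 2) d)]) := rfl
    have hstepR : pvLoopA (-d) (n+1) (-r) acc
        = pvLoopA (-d) n (PySem.Int.mod (-r * 2) (-d))
            (acc ++ [PySem.Int.toStr (PySem.Int.floordiv (-r * 2) (-d))]) := rfl
    rw [hstepL, hstepR, ih, hm2, hq]

-- joining singleton strings with '' is just the underlying character list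
theorem pvJoin_singletons (cs : List Char) :
    PySem.Str.join "" (cs.map (fun c => String.ofList [c])) = String.ofList cs := by
  apply String.toList_inj.mp
  rw [PySem.Str.toList_join]
  have h2 : (cs.map (fun c => String.ofList [c])).map String.toList = cs.map (fun c => [c]) := by
    rw [List.map_map]; simp
  rw [h2]
  rw [show ("" : String).toList = ([] : List Char) from rfl]
  rw [PySem.Chars.join_nil_singletons, String.toList_ofList]

-- main assembly for a positive divisor
theorem pvMain_pos (dividend d precision : Int) (hd : 0 < d) (hp : ¬ precision ≤ 0) :
    divide_unsigned_with_precision dividend d precision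
      = divide_unsigned_with_precision_alt dividend d precision := by
  have h0 : 0 ≤ PySem.Int.mod dividend d := PySem.Int.mod_nonneg _ hd
  have h1 : PySem.Int.mod dividend d < d := PySem.Int.mod_lt _ hd
  unfold divide_unsigned_with_precision divide_unsigned_with_precision_alt
  dsimp only
  rw [if_neg hp, pvLoopA_spec d hd precision.toNat _ h0 h1 []]
  simp [pvJoin_singletons]

-- ===== VERDICT (by name: the statement is the Claim_ definition above) =====
theorem divide_unsigned_with_precision_spec : Claim_equal_divide_unsigned_with_precision := by
  intro dividend divisor precision _ hpre
  unfold Spec_divide_unsigned_with_precision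
  rcases lt_trichotomy divisor 0 with hneg | hz | hpos
  · -- negative divisor: mirror to the positive case
    by_cases hp : precision ≤ 0
    · unfold divide_unsigned_with_precision divide_unsigned_with_precision_alt
      rw [if_pos hp]
      have : precision.toNat = 0 := by omega
      rw [this]
      rfl
    · have hdpos : 0 < -divisor := by omega
      have hb1 := (PySem.Int.mod_neg_bounds dividend hneg).1
      have hb2 := (PySem.Int.mod_neg_bounds dividend hneg).2
      have hm0 : 0 ≤ -PySem.Int.mod dividend divisor := by omega
      have hm1 : -PySem.Int.mod dividend divisor < -divisor := by omega
      unfold divide_unsigned_with_precision divide_unsigned_with_precision_alt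
      dsimp only
      rw [if_neg hp]
      rw [pvLoopA_neg divisor precision.toNat (PySem.Int.mod dividend divisor) []]
      rw [pvLoopA_spec (-divisor) hdpos precision.toNat _ hm0 hm1 []]
      have e1 : PySem.Int.floordiv (-PySem.Int.mod dividend divisor * 2 ^ precision.toNat) (-divisor)
          = PySem.Int.floordiv (PySem.Int.mod dividend divisor * 2 ^ precision.toNat) divisor := by
        rw [show -PySem.Int.mod dividend divisor * 2 ^ precision.toNat
            = -(PySem.Int.mod dividend divisor * 2 ^ precision.toNat) by ring]
        exact PySem.Int.floordiv_neg_neg _ _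
      have e2 : PySem.Int.mod (-PySem.Int.mod dividend divisor * 2 ^ precision.toNat) (-divisor)
          = -PySem.Int.mod (PySem.Int.mod dividend divisor * 2 ^ precision.toNat) divisor := by
        rw [show -PySem.Int.mod dividend divisor * 2 ^ precision.toNat
            = -(PySem.Int.mod dividend divisor * 2 ^ precision.toNat) by ring]
        exact PySem.Int.mod_neg_neg _ _
      rw [e1, e2]
      simp [pvJoin_singletons]
  · exact absurd hz hpre
  · by_cases hp : precision ≤ 0
    · unfold divide_unsigned_with_precision divide_unsigned_with_precision_alt
      rw [if_pos hp]
      have : precision.toNat = 0 := by omega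
      rw [this]
      rfl
    · exact pvMain_pos dividend divisor precision hpos hp
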